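-- pv_equiv track=rewrite | github.com/Aroister/MyPsychAdmin | old code/history_extractor_sections.py | dedupe_history
-- ===== SOURCE A (Python) =====
-- CATEGORIES_ORDERED = [
--     "Legal",
--     "Diagnosis",
--     "Circumstances of Admission",
--     "History of Presenting Complaint",
--     "Past Psychiatric History",
--     "Medication History",
--     "Drug and Alcohol History",
--     "Past Medical History",
--     "Forensic History",
--     "Personal History",
--     "Mental State Examination",
--     "Risk",
--     "Physical Examination",
--     "ECG",
--     "Impression",
--     "Plan",
--     "Capacity Assessment",
--     "Summary",
-- ]
--
-- def dedupe_history(history):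
--     """
--     V11 PRESENTATION MERGE + CLEANING:
--     - Merge entries for same date
--     - Remove all empty lines
--     - Keep flow continuous
--     """
--     out = {cat: [] for cat in CATEGORIES_ORDERED}
--
--     for cat in CATEGORIES_ORDERED:
--         grouped = {}
--
--         # Group text blocks by date
--         for entry in history.get(cat, []):
--             d = entry["date"]
--             grouped.setdefault(d, []).append(entry["text"])
--
--         merged_entries = []
--
--         for d, texts in grouped.items():
--             # Split into lines, remove empty lines, re-join
--             cleaned_lines = []
--             for t in texts:
--                 for line in t.splitlines():
--                     if line.strip():   # keep only non-empty lines
--                         cleaned_lines.append(line.strip())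
--
--             combined = "\n".join(cleaned_lines)
--
--             merged_entries.append({
--                 "date": d,
--                 "text": combined.strip()
--             })
--
--         merged_entries.sort(key=lambda e: e["date"])
--         out[cat] = merged_entries
--
--     return out
-- ===== SOURCE B (Python) =====
-- # B: per category, stably sort entries by date once and merge adjacent same-date
-- # runs with itertools.groupby — no grouping dict and no final sort (alternative decomposition).
-- from itertools import groupby
--
-- CATEGORIES_ORDERED = [
--     "Legal",
--     "Diagnosis",
--     "Circumstances of Admission",
--     "History of Presenting Complaint",
--     "Past Psychiatric History",
--     "Medication History",
--     "Drug and Alcohol History",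
--     "Past Medical History",
--     "Forensic History",
--     "Personal History",
--     "Mental State Examination",
--     "Risk",
--     "Physical Examination",
--     "ECG",
--     "Impression",
--     "Plan",
--     "Capacity Assessment",
--     "Summary",
-- ]
--
--
-- def dedupe_history(history):
--     out = {}
--     for cat in CATEGORIES_ORDERED:
--         entries = sorted(history.get(cat, []), key=lambda e: e["date"])
--         merged = [{"date": d,
--                    "text": "\n".join(line.strip()
--                                       for e in grp
--                                       for line in e["text"].splitlines()
--                                       if line.strip()).strip()}
--                   for d, grp in groupby(entries, key=lambda e: e["date"])]
--         out[cat] = merged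
--     return out
-- ===== Notes on version B (the rewrite author's own statement) =====
-- stated objective: simpler
-- what changed: Instead of grouping texts into a per-date dict and sorting the merged entries afterwards, B stably sorts each category's entries by date once and merges adjacent equal-date runs with itertools.groupby, so the grouping dict and the final sort disappear.
import Mathlib
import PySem

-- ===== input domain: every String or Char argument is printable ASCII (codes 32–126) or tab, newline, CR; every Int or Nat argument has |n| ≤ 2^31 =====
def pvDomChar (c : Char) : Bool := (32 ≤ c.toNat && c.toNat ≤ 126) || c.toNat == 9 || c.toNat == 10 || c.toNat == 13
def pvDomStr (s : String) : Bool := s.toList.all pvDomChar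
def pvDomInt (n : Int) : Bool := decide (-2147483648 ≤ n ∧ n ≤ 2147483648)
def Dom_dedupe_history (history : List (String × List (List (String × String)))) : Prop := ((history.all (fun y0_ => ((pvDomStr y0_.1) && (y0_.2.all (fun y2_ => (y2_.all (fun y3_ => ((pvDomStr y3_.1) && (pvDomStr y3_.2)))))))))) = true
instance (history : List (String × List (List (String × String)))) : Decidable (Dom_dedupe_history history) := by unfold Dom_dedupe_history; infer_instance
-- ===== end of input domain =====

-- B replaces A's per-date grouping dict + final sort by one stable sort per category
-- followed by a linear merge of adjacent equal-date runs (objective: simpler, same cost).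

-- ===== PORT A =====
def pvCategories : List String :=
  ["Legal", "Diagnosis", "Circumstances of Admission", "History of Presenting Complaint",
   "Past Psychiatric History", "Medication History", "Drug and Alcohol History",
   "Past Medical History", "Forensic History", "Personal History",
   "Mental State Examination", "Risk", "Physical Examination", "ECG",
   "Impression", "Plan", "Capacity Assessment", "Summary"]

-- entry["k"] : Python raises KeyError when k is missing; those inputs are outside
-- Pre_dedupe_history, inside which getD _ "" is exact.
def pvAKey (e : List (String × String)) (k : String) : String := (PySem.Dict.mk e).getD k ""

-- A's cleaning loop: split each text into lines, keep stripped non-empty lines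
def pvAClean (texts : List String) : List String :=
  texts.foldl
    (fun cl t =>
      (PySem.Str.splitlines t).foldl
        (fun cl line =>
          if PySem.Str.strip line ≠ "" then cl ++ [PySem.Str.strip line] else cl)
        cl)
    []

-- the body of A's per-category loop: group texts by date, clean, merge, sort by date
def pvACat (entries : List (List (String × String))) : List (List (String × String)) :=
  let grouped : PySem.Dict String (List String) :=
    entries.foldl
      (fun g e => g.modify (pvAKey e "date") [] (fun ts => ts ++ [pvAKey e "text"]))
      PySem.Dict.empty
  let merged : List (List (String × String)) :=
    grouped.items.foldl
      (fun m p =>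
        m ++ [[("date", p.1), ("text", PySem.Str.strip (PySem.Str.join "\n" (pvAClean p.2)))]])
      []
  PySem.List.sorted merged (fun e => pvAKey e "date")

def dedupe_history (history : List (String × List (List (String × String)))) : List (String × List (List (String × String))) :=
  let out0 : PySem.Dict String (List (List (String × String))) :=
    pvCategories.foldl (fun d cat => d.insert cat []) PySem.Dict.empty
  let out :=
    pvCategories.foldl
      (fun d cat => d.insert cat (pvACat ((PySem.Dict.mk history).getD cat [])))
      out0
  out.items

-- ===== PORT B =====
-- entry["date"] / entry["text"]: KeyError outside Pre_dedupe_history, exact inside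
def pvBDate (e : List (String × String)) : String := (PySem.Dict.mk e).getD "date" ""
def pvBText (e : List (String × String)) : String := (PySem.Dict.mk e).getD "text" ""

-- the cleaned lines contributed by one entry
def pvBClean (e : List (String × String)) : List String :=
  ((PySem.Str.splitlines (pvBText e)).filter (fun line => PySem.Str.strip line ≠ "")).map
    (fun line => PySem.Str.strip line)

-- itertools.groupby(l, key=date): maximal adjacent runs with equal date
def pvGroupby : List (List (String × String)) → List (String × List (List (String × String)))
  | [] => []
  | e :: rest =>
      (pvBDate e, e :: rest.takeWhile (fun x => pvBDate x == pvBDate e)) ::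
        pvGroupby (rest.dropWhile (fun x => pvBDate x == pvBDate e))
  termination_by l => l.length
  decreasing_by simpa using Nat.lt_succ_of_le (List.length_dropWhile_le _ _)

def pvBCat (entries : List (List (String × String))) : List (List (String × String)) :=
  (pvGroupby (PySem.List.sorted entries (fun e => pvBDate e))).map
    (fun g =>
      [("date", g.1),
       ("text", PySem.Str.strip (PySem.Str.join "\n" (g.2.flatMap pvBClean)))])

def dedupe_history_alt (history : List (String × List (List (String × String)))) : List (String × List (List (String × String))) :=
  (pvCategories.foldl
      (fun d cat => d.insert cat (pvBCat ((PySem.Dict.mk history).getD cat [])))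
      PySem.Dict.empty).items

-- ===== PRECONDITION & SPEC =====
-- A raises KeyError when an entry of a tracked category lacks the key "date" or "text";
-- Pre_ excludes exactly those inputs (entries under untracked keys are never read).
def Pre_dedupe_history (history : List (String × List (List (String × String)))) : Prop :=
  ∀ cat ∈ pvCategories, ∀ e ∈ (PySem.Dict.mk history).getD cat [],
    (PySem.Dict.mk e).contains "date" = true ∧ (PySem.Dict.mk e).contains "text" = true
instance (history : List (String × List (List (String × String)))) : Decidable (Pre_dedupe_history history) := by unfold Pre_dedupe_history; infer_instance

def pvWitness_dedupe_history : (List (String × List (List (String × String)))) :=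
  [("Legal", [[("date", "2024-01-02"), ("text", " a \n\n b ")],
              [("date", "2024-01-01"), ("text", "c")],
              [("date", "2024-01-02"), ("text", "d")]])]

def Spec_dedupe_history (history : List (String × List (List (String × String)))) (out : List (String × List (List (String × String)))) : Prop := out = dedupe_history_alt history
instance (history : List (String × List (List (String × String)))) (out : List (String × List (List (String × String)))) : Decidable (Spec_dedupe_history history out) := by unfold Spec_dedupe_history; infer_instance

-- ===== CLAIM (what is proved, stated in full; the proofs are below) =====
def Claim_equal_dedupe_history : Prop := ∀ (history : List (String × List (List (String × String)))), Dom_dedupe_history history → Pre_dedupe_history history → Spec_dedupe_history history (dedupe_history history)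

-- ===== LEMMAS AND PROOFS =====

-- the canonical per-category result both ports are reduced to
def pvCanonCat (entries : List (List (String × String))) : List (List (String × String)) :=
  (PySem.List.sorted (PySem.Set.ofList (entries.map pvBDate)) (fun x => x)).map
    (fun c =>
      [("date", c),
       ("text", PySem.Str.strip (PySem.Str.join "\n"
          ((entries.filter (fun e => pvBDate e == c)).flatMap pvBClean)))])

-- ---- generic dict-fold lemmas for the category loops ----
theorem pv_getD_foldl_insert_not_mem {V : Type} (cats : List String) (f : String → V)
    (d : PySem.Dict String V) (c : String) (v0 : V) (hc : c ∉ cats) :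
    (cats.foldl (fun d x => d.insert x (f x)) d).getD c v0 = d.getD c v0 := by
  induction cats generalizing d with
  | nil => rfl
  | cons x cs ih =>
      simp only [List.mem_cons, not_or] at hc
      rw [List.foldl_cons, ih _ hc.2, PySem.Dict.getD_insert_of_ne _ _ _ hc.1]

theorem pv_getD_foldl_insert_mem {V : Type} (cats : List String) (f : String → V)
    (d : PySem.Dict String V) (c : String) (v0 : V) (hnd : cats.Nodup) (hc : c ∈ cats) :
    (cats.foldl (fun d x => d.insert x (f x)) d).getD c v0 = f c := by
  induction cats generalizing d with
  | nil => exact absurd hc (by simp)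
  | cons x cs ih =>
      rw [List.foldl_cons]
      rcases List.mem_cons.mp hc with h | h
      · subst h
        rw [pv_getD_foldl_insert_not_mem _ _ _ _ _ (List.nodup_cons.mp hnd).1,
          PySem.Dict.getD_insert_self]
      · exact ih _ (List.nodup_cons.mp hnd).2 h

theorem pv_items_foldl_insert {V : Type} (F : String → V) (d : PySem.Dict String V)
    (hk : (pvCategories.foldl (fun d c => d.insert c (F c)) d).keys = pvCategories) :
    (pvCategories.foldl (fun d c => d.insert c (F c)) d).items
      = pvCategories.map (fun c => (c, F c)) := by
  have hnodup : (pvCategories.foldl (fun d c => d.insert c (F c)) d).keys.Nodup := by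
    rw [hk]; decide
  rw [PySem.Dict.items_eq_map_keys _ hnodup (F "Legal"), hk]
  exact List.map_congr_left fun c hc => by
    rw [pv_getD_foldl_insert_mem _ _ _ _ _ (by decide) hc]

-- ---- A-side characterisation ----
theorem pvKey_mk_date (c t : String) : pvAKey [("date", c), ("text", t)] "date" = c := by
  simp [pvAKey, PySem.Dict.getD_eq_get?_getD, PySem.Dict.get?_mk_cons]

theorem pvAClean_eq (texts : List String) :
    pvAClean texts
      = texts.flatMap (fun t =>
          ((PySem.Str.splitlines t).filter (fun line => PySem.Str.strip line ≠ "")).map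
            (fun line => PySem.Str.strip line)) := by
  unfold pvAClean
  rw [PySem.List.foldl_congr_mem _ _
        (fun cl t => cl ++
          ((PySem.Str.splitlines t).filter (fun line => decide (PySem.Str.strip line ≠ ""))).map
            (fun line => PySem.Str.strip line)) _
        (fun acc t _ => PySem.List.foldl_append_ite _ _ _ _),
      PySem.List.foldl_append_eq_flatMap]
  simp

theorem pvAKey_date (e : List (String × String)) : pvAKey e "date" = pvBDate e := rfl

theorem pvACat_eq (entries : List (List (String × String))) :
    pvACat entries = pvCanonCat entries := by
  have hpairs :
      (entries.foldl
          (fun g e => g.modify (pvAKey e "date") [] (fun ts => ts ++ [pvAKey e "text"]))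
          PySem.Dict.empty)
        = ((entries.map (fun e => (pvBDate e, pvBText e))).foldl
            (fun g p => g.modify p.1 [] (fun ts => ts ++ [p.2])) PySem.Dict.empty) := by
    rw [List.foldl_map]
    rfl
  have hkeys :
      (entries.foldl
          (fun g e => g.modify (pvAKey e "date") [] (fun ts => ts ++ [pvAKey e "text"]))
          PySem.Dict.empty).keys = PySem.Set.ofList (entries.map pvBDate) := by
    have := PySem.Dict.keys_foldl_modify_key entries (fun e => pvAKey e "date") []
      (fun _ e => fun ts => ts ++ [pvAKey e "text"]) PySem.Dict.empty
    simpa [pvAKey_date] using this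
  have hnd :
      (entries.foldl
          (fun g e => g.modify (pvAKey e "date") [] (fun ts => ts ++ [pvAKey e "text"]))
          PySem.Dict.empty).keys.Nodup := by
    exact PySem.Dict.nodup_keys_foldl_modify_key entries (fun e => pvAKey e "date") []
      (fun _ e => fun ts => ts ++ [pvAKey e "text"]) PySem.Dict.empty
      (by simp [PySem.Dict.keys_empty])
  have hget : ∀ c,
      (entries.foldl
          (fun g e => g.modify (pvAKey e "date") [] (fun ts => ts ++ [pvAKey e "text"]))
          PySem.Dict.empty).getD c []
        = (entries.filter (fun e => pvBDate e == c)).map pvBText := by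
    intro c
    rw [hpairs, PySem.Dict.getD_foldl_modify_append, List.filter_map, List.map_map]
    rfl
  have hitems :
      (entries.foldl
          (fun g e => g.modify (pvAKey e "date") [] (fun ts => ts ++ [pvAKey e "text"]))
          PySem.Dict.empty).items
        = (PySem.Set.ofList (entries.map pvBDate)).map
            (fun c => (c, (entries.filter (fun e => pvBDate e == c)).map pvBText)) := by
    rw [PySem.Dict.items_eq_map_keys _ hnd [], hkeys]
    exact List.map_congr_left fun c _ => by rw [hget]
  simp only [pvACat, hitems, PySem.List.foldl_append_singleton_eq_map, List.nil_append,
    List.map_map]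
  unfold pvCanonCat
  apply PySem.List.sorted_eq_of_perm_of_pairwise_lt
  · have hfun : ∀ c : String,
        ((fun x : String × List String =>
            [("date", x.1), ("text", PySem.Str.strip (PySem.Str.join "\n" (pvAClean x.2)))]) ∘
          fun c => (c, (entries.filter (fun e => pvBDate e == c)).map pvBText)) c
          = (fun c =>
              [("date", c),
               ("text", PySem.Str.strip (PySem.Str.join "\n"
                  ((entries.filter (fun e => pvBDate e == c)).flatMap pvBClean)))]) c := by
      intro c
      simp only [Function.comp]
      rw [pvAClean_eq, List.flatMap_map]
      rfl
    exact (List.Perm.map _ (PySem.List.sorted_perm _ _ _)).trans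
      (List.Perm.of_eq (List.map_congr_left (fun c _ => hfun c)).symm)
  · rw [List.pairwise_map]
    have := PySem.List.sorted_ofList_pairwise_lt (entries.map pvBDate)
    refine this.imp ?_
    intro a b hab
    simpa [pvKey_mk_date] using hab

-- ---- B-side characterisation ----
theorem pvGroupby_facts (l : List (List (String × String)))
    (h : l.Pairwise (fun a b => pvBDate a ≤ pvBDate b)) :
    ((pvGroupby l).map Prod.fst).Pairwise (· < ·)
      ∧ (∀ c, c ∈ (pvGroupby l).map Prod.fst ↔ c ∈ l.map pvBDate)
      ∧ (∀ p ∈ pvGroupby l, p.2 = l.filter (fun e => pvBDate e == p.1)) := by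
  induction l using pvGroupby.induct with
  | case1 => simp [pvGroupby]
  | case2 e rest ih =>
      have h1 : ∀ x ∈ rest, pvBDate e ≤ pvBDate x := (List.pairwise_cons.mp h).1
      have h2 : rest.Pairwise (fun a b => pvBDate a ≤ pvBDate b) := (List.pairwise_cons.mp h).2
      have htw : ∀ x ∈ rest.takeWhile (fun x => pvBDate x == pvBDate e), pvBDate x = pvBDate e := by
        intro x hx
        exact eq_of_beq (List.mem_takeWhile_imp (p := fun x => pvBDate x == pvBDate e) hx)
      have hdwp : (rest.dropWhile (fun x => pvBDate x == pvBDate e)).Pairwise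
          (fun a b => pvBDate a ≤ pvBDate b) := h2.sublist (List.dropWhile_sublist _)
      have hlt : ∀ x ∈ rest.dropWhile (fun x => pvBDate x == pvBDate e),
          pvBDate e < pvBDate x := by
        cases hd : rest.dropWhile (fun x => pvBDate x == pvBDate e) with
        | nil => intro x hx; simp at hx
        | cons y t =>
            have hysub : y ∈ rest := (List.dropWhile_sublist _).subset (hd ▸ List.mem_cons_self)
            have hqy : (pvBDate y == pvBDate e) = false := by
              have := List.head?_dropWhile_not (fun x => pvBDate x == pvBDate e) rest
              rw [hd] at this
              simpa using this
            have hey : pvBDate e < pvBDate y :=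
              lt_of_le_of_ne (h1 y hysub) (fun hh => by simp [hh.symm] at hqy)
            intro x hx
            rcases List.mem_cons.mp hx with rfl | hx'
            · exact hey
            · exact lt_of_lt_of_le hey ((List.pairwise_cons.mp (hd ▸ hdwp)).1 x hx')
      have hsplit : rest = rest.takeWhile (fun x => pvBDate x == pvBDate e)
          ++ rest.dropWhile (fun x => pvBDate x == pvBDate e) :=
        (List.takeWhile_append_dropWhile).symm
      obtain ⟨G1, G2, G3⟩ := ih hdwp
      have hmemdw : ∀ c ∈ (pvGroupby (rest.dropWhile (fun x => pvBDate x == pvBDate e))).map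
          Prod.fst, pvBDate e < c := by
        intro c hc
        rcases List.mem_map.mp ((G2 c).mp hc) with ⟨x, hx, rfl⟩
        exact hlt x hx
      rw [pvGroupby]
      refine ⟨?_, ?_, ?_⟩
      · exact List.pairwise_cons.mpr ⟨hmemdw, G1⟩
      · intro c
        simp only [List.map_cons, List.mem_cons, G2]
        constructor
        · rintro (rfl | hc)
          · exact Or.inl rfl
          · rcases List.mem_map.mp hc with ⟨x, hx, rfl⟩
            exact Or.inr (List.mem_map_of_mem ((List.dropWhile_sublist _).subset hx))
        · rintro (rfl | hc)
          · exact Or.inl rfl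
          · rcases List.mem_map.mp hc with ⟨x, hx, rfl⟩
            rw [hsplit] at hx
            rcases List.mem_append.mp hx with hx' | hx'
            · exact Or.inl (htw x hx')
            · exact Or.inr (List.mem_map_of_mem hx')
      · intro p hp
        rcases List.mem_cons.mp hp with rfl | hp'
        · have hrf : rest.filter (fun x => pvBDate x == pvBDate e)
              = rest.takeWhile (fun x => pvBDate x == pvBDate e) := by
            conv_lhs => rw [hsplit]
            rw [List.filter_append,
              List.filter_eq_self.mpr (fun x hx => by simpa using htw x hx),
              List.filter_eq_nil_iff.mpr
                (fun x hx => by simpa using (ne_of_gt (hlt x hx))),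
              List.append_nil]
          simp only [List.filter_cons, BEq.rfl, if_pos, hrf]
        · have hcgt : pvBDate e < p.1 :=
            hmemdw p.1 (List.mem_map_of_mem hp')
          have hrf : rest.filter (fun x => pvBDate x == p.1)
              = (rest.dropWhile (fun x => pvBDate x == pvBDate e)).filter
                  (fun x => pvBDate x == p.1) := by
            conv_lhs => rw [hsplit]
            rw [List.filter_append,
              List.filter_eq_nil_iff.mpr
                (fun x hx => by simpa [htw x hx] using (ne_of_lt hcgt)),
              List.nil_append]
          rw [G3 p hp', List.filter_cons, if_neg (by simpa using (ne_of_lt hcgt)), hrf]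

theorem pv_insertBy_filter {α : Type} (key : α → String) (c : String) (x : α)
    (l : List α) (h : l.Pairwise (fun a b => key a ≤ key b)) :
    (PySem.List.insertBy (fun a b => decide (key a < key b)) x l).filter (fun y => key y == c)
      = l.filter (fun y => key y == c) ++ (if key x == c then [x] else []) := by
  induction l with
  | nil => simp [PySem.List.insertBy, List.filter_cons]
  | cons y ys ih =>
      have hyall : ∀ z ∈ ys, key y ≤ key z := (List.pairwise_cons.mp h).1
      have hys : ys.Pairwise (fun a b => key a ≤ key b) := (List.pairwise_cons.mp h).2
      by_cases hxy : key x < key y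
      · simp only [PySem.List.insertBy, decide_eq_true hxy, if_pos]
        have hz : ∀ z ∈ y :: ys, key x < key z := by
          intro z hz
          rcases List.mem_cons.mp hz with rfl | hz'
          · exact hxy
          · exact lt_of_lt_of_le hxy (hyall z hz')
        by_cases hxc : key x = c
        · have hfil : (y :: ys).filter (fun z => key z == c) = [] :=
            List.filter_eq_nil_iff.mpr
              (fun z hzz => by simpa using (hxc ▸ ne_of_gt (hz z hzz)))
          simp [hxc, hfil]
        · simp [hxc]
      · simp only [PySem.List.insertBy, decide_eq_false hxy, if_neg, Bool.false_eq_true,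
          not_false_eq_true]
        rw [List.filter_cons, List.filter_cons, ih hys]
        by_cases hyc : key y = c
        · simp [hyc]
        · simp [hyc]

theorem pv_sorted_filter {α : Type} (xs : List α) (key : α → String) (c : String) :
    (PySem.List.sorted xs key).filter (fun y => key y == c)
      = xs.filter (fun y => key y == c) := by
  induction xs using List.reverseRecOn with
  | nil => rfl
  | append_singleton ys x ih =>
      rw [PySem.List.sorted_eq_foldl_insertBy, List.foldl_append, List.foldl_cons,
        List.foldl_nil, ← PySem.List.sorted_eq_foldl_insertBy,
        pv_insertBy_filter key c x _ (PySem.List.sorted_pairwise ys key),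
        ih, List.filter_append]
      congr 1
      by_cases hxc : key x = c
      · simp [hxc]
      · simp [hxc]

theorem pvBCat_eq (entries : List (List (String × String))) :
    pvBCat entries = pvCanonCat entries := by
  obtain ⟨G1, G2, G3⟩ := pvGroupby_facts (PySem.List.sorted entries (fun e => pvBDate e))
    (PySem.List.sorted_pairwise entries (fun e => pvBDate e))
  have hkeys :
      PySem.List.sorted (PySem.Set.ofList (entries.map pvBDate)) (fun x => x)
        = (pvGroupby (PySem.List.sorted entries (fun e => pvBDate e))).map Prod.fst := by
    apply PySem.List.sorted_eq_of_perm_of_pairwise_lt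
    · rw [List.perm_ext_iff_of_nodup (G1.imp ne_of_lt) (PySem.Set.nodup_ofList _)]
      intro c
      rw [G2, PySem.Set.mem_ofList]
      exact ((PySem.List.sorted_perm entries (fun e => pvBDate e) false).map pvBDate).mem_iff
    · exact G1
  unfold pvBCat pvCanonCat
  rw [hkeys, List.map_map]
  refine List.map_congr_left fun g hg => ?_
  simp only [Function.comp]
  rw [G3 g hg, pv_sorted_filter]

-- ===== VERDICT (by name: the statement is the Claim_ definition above) =====
set_option maxRecDepth 16384 in
theorem dedupe_history_spec : Claim_equal_dedupe_history := by
  intro history _ _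
  unfold Spec_dedupe_history dedupe_history dedupe_history_alt
  have hkA :
      (pvCategories.foldl
          (fun d cat => d.insert cat (pvACat ((PySem.Dict.mk history).getD cat [])))
          (pvCategories.foldl (fun d cat => d.insert cat []) PySem.Dict.empty)).keys
        = pvCategories := by
    rw [PySem.Dict.keys_foldl_insert, PySem.Dict.keys_foldl_insert]
    decide
  have hkB :
      (pvCategories.foldl
          (fun d cat => d.insert cat (pvBCat ((PySem.Dict.mk history).getD cat [])))
          PySem.Dict.empty).keys = pvCategories := by
    rw [PySem.Dict.keys_foldl_insert]
    decide
  rw [pv_items_foldl_insert _ _ hkA, pv_items_foldl_insert _ _ hkB]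
  exact List.map_congr_left fun c _ => by rw [pvACat_eq, pvBCat_eq]
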